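-- pv_equiv track=rewrite | github.com/devyeony/algorithm-study | 00_others/Sawyer/8958_OX.py | logic
-- ===== SOURCE A (Python) =====
-- def logic(word : str) -> int:
--     temp = 0
--     result = 0
--     for i in word:
--         if i == 'O':
--             temp+=1
--             result+=temp
--         else :
--             temp = 0
--
--     return result
-- ===== SOURCE B (Python) =====
-- import re
--
-- def logic(word: str) -> int:
--     runs = re.findall('O+', word)
--     return sum(len(r) * (len(r) + 1) // 2 for r in runs)
-- ===== Notes on version B (the rewrite author's own statement) =====
-- stated objective: alternative
-- what changed: Replaces the per-character running accumulator with extracting maximal O-runs (regex) and summing the closed-form triangular number k*(k+1)//2 per run length.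
import Mathlib
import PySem

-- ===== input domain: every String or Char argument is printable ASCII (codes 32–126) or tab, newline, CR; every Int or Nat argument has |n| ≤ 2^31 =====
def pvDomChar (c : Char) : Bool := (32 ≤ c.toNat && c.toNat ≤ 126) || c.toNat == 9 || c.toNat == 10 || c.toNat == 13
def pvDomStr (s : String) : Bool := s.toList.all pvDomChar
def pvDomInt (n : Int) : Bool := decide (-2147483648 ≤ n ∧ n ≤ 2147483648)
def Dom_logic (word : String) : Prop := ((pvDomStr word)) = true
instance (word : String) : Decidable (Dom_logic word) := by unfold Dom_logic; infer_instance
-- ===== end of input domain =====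

-- B replaces A's per-character running accumulator by a run-length scan: each maximal
-- run of 'O' of length k contributes the triangular number k*(k+1)//2 (alternative decomposition).

-- ===== PORT A =====
-- fold over the characters with state (temp, result), exactly as A's loop
def logicLoop (cs : List Char) (temp result : Int) : Int :=
  match cs with
  | [] => result
  | c :: rest =>
    if c = 'O' then logicLoop rest (temp + 1) (result + (temp + 1))
    else logicLoop rest 0 result

def logic (word : String) : Int := logicLoop word.toList 0 0

-- ===== PORT B =====
-- triangular number k*(k+1)//2 of a run length (// is exact Nat division here)
def triRun (k : Nat) : Int := ((k * (k + 1)) / 2 : Nat)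

-- scan the characters collecting the length k of the current maximal 'O' run;
-- at a non-'O' (or the end) the run closes and contributes triRun k — this is
-- Source B's "find O+ runs, sum triangulars" expressed as one run-length pass
def runsSum (cs : List Char) (k : Nat) : Int :=
  match cs with
  | [] => triRun k
  | c :: rest =>
    if c = 'O' then runsSum rest (k + 1)
    else triRun k + runsSum rest 0

def logic_alt (word : String) : Int := runsSum word.toList 0

-- ===== PRECONDITION & SPEC =====
def Spec_logic (word : String) (out : Int) : Prop := out = logic_alt word
instance (word : String) (out : Int) : Decidable (Spec_logic word out) := by unfold Spec_logic; infer_instance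

-- ===== CLAIM (what is proved, stated in full; the proofs are below) =====
def Claim_equal_logic : Prop := ∀ (word : String), Dom_logic word → Spec_logic word (logic word)

-- ===== LEMMAS AND PROOFS =====
theorem triRun_succ (k : Nat) : triRun (k + 1) = triRun k + (k + 1) := by
  unfold triRun
  have h2 : 2 ∣ k * (k + 1) := (Nat.even_mul_succ_self k).two_dvd
  obtain ⟨m, hm⟩ := h2
  have : (k + 1) * (k + 1 + 1) = 2 * (m + (k + 1)) := by
    nlinarith [hm]
  rw [hm, this, Nat.mul_div_cancel_left _ (by norm_num), Nat.mul_div_cancel_left _ (by norm_num)]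
  push_cast
  ring

theorem logicLoop_eq (cs : List Char) (t : Nat) (r : Int) :
    logicLoop cs (t : Int) r = r - triRun t + runsSum cs t := by
  induction cs generalizing t r with
  | nil => simp [logicLoop, runsSum]
  | cons c rest ih =>
    by_cases hc : c = 'O'
    · have h1 : logicLoop (c :: rest) (t : Int) r
          = logicLoop rest ((t : Int) + 1) (r + ((t : Int) + 1)) := by
        simp [logicLoop, hc]
      have h2 : ((t : Int) + 1) = ((t + 1 : Nat) : Int) := by push_cast; ring
      rw [h1, h2]
      rw [ih (t + 1) (r + ((t + 1 : Nat) : Int))]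
      simp [runsSum, hc, triRun_succ]
    · have h1 : logicLoop (c :: rest) (t : Int) r = logicLoop rest 0 r := by
        simp [logicLoop, hc]
      have h2 : (0 : Int) = ((0 : Nat) : Int) := by norm_num
      rw [h1, h2, ih 0 r]
      simp [runsSum, hc, triRun]
      ring

-- ===== VERDICT (by name: the statement is the Claim_ definition above) =====
theorem logic_spec : Claim_equal_logic := by
  intro word _
  unfold Spec_logic logic logic_alt
  have := logicLoop_eq word.toList 0 0
  simpa [triRun] using this
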